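-- pv_equiv track=rewrite | github.com/fdebrain/aoc | 2022/day14.py | determine_boundaries
-- ===== SOURCE A (Python) =====
-- def determine_boundaries(data, part_id):
--     min_x, min_y = 500, 0
--     max_x, max_y = 500, 0
--
--     for path in data:
--         x_list, y_list = list(zip(*path))
--
--         if min(x_list) < min_x:
--             min_x = min(x_list)
--
--         if min(y_list) < min_y:
--             min_y = min(y_list)
--
--         if max(x_list) > max_x:
--             max_x = max(x_list)
--
--         if max(y_list) > max_y:
--             max_y = max(y_list)
--
--     # Source should be included
--     min_x = min(500, min_x)
--     max_x = max(500, max_x)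
--
--     if part_id == 2:
--         min_x = min_x - max_y
--         max_x = max_x + max_y
--         max_y = max_y + 2
--
--     return min_x, min_y, max_x, max_y
-- ===== SOURCE B (Python) =====
-- def determine_boundaries(data, part_id):
--     xs = sorted([500] + [x for path in data for x, _ in path])
--     ys = sorted([0] + [y for path in data for _, y in path])
--     min_x, max_x = xs[0], xs[-1]
--     min_y, max_y = ys[0], ys[-1]
--     if part_id == 2:
--         min_x -= max_y
--         max_x += max_y
--         max_y += 2
--     return min_x, min_y, max_x, max_y
-- ===== Notes on version B (the rewrite author's own statement) =====
-- stated objective: alternative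
-- what changed: B replaces A's per-path running min/max update loop with sort-then-pick: it flattens all coordinates into two seeded lists (500 for x, 0 for y), sorts each once, and reads the extremes off the sorted ends.
-- crash fix: On data containing an empty path A raises ValueError (unpacking list(zip(*[])) into two variables), while B simply skips the empty path and returns the boundaries of the remaining points. — e.g. on determine_boundaries([[]], 1): A raises ValueError, B returns (500, 0, 500, 0)
import Mathlib
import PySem

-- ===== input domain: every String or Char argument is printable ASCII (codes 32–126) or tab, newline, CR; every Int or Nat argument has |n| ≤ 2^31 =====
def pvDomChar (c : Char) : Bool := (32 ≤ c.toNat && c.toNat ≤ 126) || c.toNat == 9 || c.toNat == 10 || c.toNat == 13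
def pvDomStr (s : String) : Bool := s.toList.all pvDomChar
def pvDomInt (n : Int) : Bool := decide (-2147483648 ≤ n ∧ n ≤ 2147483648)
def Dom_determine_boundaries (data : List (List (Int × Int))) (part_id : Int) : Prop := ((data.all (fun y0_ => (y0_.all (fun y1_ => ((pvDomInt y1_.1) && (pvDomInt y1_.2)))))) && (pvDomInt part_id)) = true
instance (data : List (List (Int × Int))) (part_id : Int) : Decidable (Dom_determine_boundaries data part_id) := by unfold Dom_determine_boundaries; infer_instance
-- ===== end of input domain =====

-- B replaces A's per-path running min/max update loop with sort-then-pick: flatten the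
-- coordinates into two seeded lists, sort each once, read the extremes off the sorted ends
-- (objective: alternative). Equivalence is over the return value only.

-- ===== PORT A =====
-- min(x_list)/max(x_list) are ported with PySem.List.min?/max?; the `.getD` default is only
-- reached when a path is empty, where Python raises ValueError — excluded by Pre_.
def determine_boundaries (data : List (List (Int × Int))) (part_id : Int) : Int × Int × Int × Int :=
  let st := data.foldl (fun (st : Int × Int × Int × Int) path =>
    let (min_x, min_y, max_x, max_y) := st
    let x_list := path.map Prod.fst
    let y_list := path.map Prod.snd
    let min_x := if (PySem.List.min? x_list (fun v => v)).getD min_x < min_x then (PySem.List.min? x_list (fun v => v)).getD min_x else min_x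
    let min_y := if (PySem.List.min? y_list (fun v => v)).getD min_y < min_y then (PySem.List.min? y_list (fun v => v)).getD min_y else min_y
    let max_x := if (PySem.List.max? x_list (fun v => v)).getD max_x > max_x then (PySem.List.max? x_list (fun v => v)).getD max_x else max_x
    let max_y := if (PySem.List.max? y_list (fun v => v)).getD max_y > max_y then (PySem.List.max? y_list (fun v => v)).getD max_y else max_y
    (min_x, min_y, max_x, max_y)) (500, 0, 500, 0)
  let (min_x, min_y, max_x, max_y) := st
  let min_x := min 500 min_x
  let max_x := max 500 max_x
  if part_id == 2 then (min_x - max_y, min_y, max_x + max_y, max_y + 2)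
  else (min_x, min_y, max_x, max_y)

-- ===== PORT B =====
-- xs/ys are nonempty by construction (seeded with 500 / 0), so xs[0] / xs[-1] never raise and
-- the `.getD 0` defaults are unreachable.
def determine_boundaries_alt (data : List (List (Int × Int))) (part_id : Int) : Int × Int × Int × Int :=
  let xs := PySem.List.sorted (500 :: data.flatMap (fun path => path.map Prod.fst)) (fun v => v) false
  let ys := PySem.List.sorted (0 :: data.flatMap (fun path => path.map Prod.snd)) (fun v => v) false
  let min_x := (PySem.List.pyGet? xs 0).getD 0
  let max_x := (PySem.List.pyGet? xs (-1)).getD 0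
  let min_y := (PySem.List.pyGet? ys 0).getD 0
  let max_y := (PySem.List.pyGet? ys (-1)).getD 0
  if part_id == 2 then (min_x - max_y, min_y, max_x + max_y, max_y + 2)
  else (min_x, min_y, max_x, max_y)

-- ===== PRECONDITION & SPEC =====
-- Pre_ excludes exactly the inputs where A raises ValueError: a data list containing an empty path.
def Pre_determine_boundaries (data : List (List (Int × Int))) (part_id : Int) : Prop :=
  ∀ path ∈ data, path ≠ []
instance (data : List (List (Int × Int))) (part_id : Int) : Decidable (Pre_determine_boundaries data part_id) := by unfold Pre_determine_boundaries; infer_instance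
def pvWitness_determine_boundaries : (List (List (Int × Int))) × Int := ([[(498, 4), (502, 9)]], 2)

-- On data containing an empty path A raises ValueError (unpacking list(zip(*[])) into two
-- variables), while B skips the empty path and returns the boundaries of the remaining points.
def Raises_determine_boundaries (data : List (List (Int × Int))) (part_id : Int) : Prop :=
  [] ∈ data
instance (data : List (List (Int × Int))) (part_id : Int) : Decidable (Raises_determine_boundaries data part_id) := by unfold Raises_determine_boundaries; infer_instance
def pvRaiseWitness_determine_boundaries : (List (List (Int × Int))) × Int := ([[]], 1)
def pvRaiseWitnessOut_determine_boundaries : Int × Int × Int × Int := (500, 0, 500, 0)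

def Spec_determine_boundaries (data : List (List (Int × Int))) (part_id : Int) (out : Int × Int × Int × Int) : Prop := out = determine_boundaries_alt data part_id
instance (data : List (List (Int × Int))) (part_id : Int) (out : Int × Int × Int × Int) : Decidable (Spec_determine_boundaries data part_id out) := by unfold Spec_determine_boundaries; infer_instance

-- ===== CLAIM (what is proved, stated in full; the proofs are below) =====
def Claim_equal_determine_boundaries : Prop := ∀ (data : List (List (Int × Int))) (part_id : Int), Dom_determine_boundaries data part_id → Pre_determine_boundaries data part_id → Spec_determine_boundaries data part_id (determine_boundaries data part_id)
def Claim_raises_determine_boundaries : Prop := (∀ (data : List (List (Int × Int))) (part_id : Int), Dom_determine_boundaries data part_id → Raises_determine_boundaries data part_id → ¬ Pre_determine_boundaries data part_id) ∧ (Dom_determine_boundaries (pvRaiseWitness_determine_boundaries.1) (pvRaiseWitness_determine_boundaries.2) ∧ Raises_determine_boundaries (pvRaiseWitness_determine_boundaries.1) (pvRaiseWitness_determine_boundaries.2) ∧ determine_boundaries_alt (pvRaiseWitness_determine_boundaries.1) (pvRaiseWitness_determine_boundaries.2) = pvRaiseWitnessOut_determine_boundaries)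

-- ===== LEMMAS AND PROOFS =====

lemma foldl_min_min (a x : Int) (l : List Int) :
    List.foldl min (min a x) l = min a (List.foldl min x l) := by
  induction l generalizing x with
  | nil => rfl
  | cons h t ih => simp only [List.foldl, min_assoc, ih]

lemma foldl_max_max (a x : Int) (l : List Int) :
    List.foldl max (max a x) l = max a (List.foldl max x l) := by
  induction l generalizing x with
  | nil => rfl
  | cons h t ih => simp only [List.foldl, max_assoc, ih]

lemma foldl_min_mem (l : List Int) : ∀ a : Int, List.foldl min a l ∈ a :: l := by
  induction l with
  | nil => simp
  | cons h t ih =>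
    intro a
    simp only [List.foldl_cons]
    rcases List.mem_cons.mp (ih (min a h)) with hm | hm
    · rw [hm]; rcases min_cases a h with ⟨he, _⟩ | ⟨he, _⟩ <;> simp [he]
    · exact List.mem_cons_of_mem _ (List.mem_cons_of_mem _ hm)

lemma foldl_min_le_mem (l : List Int) : ∀ a : Int, ∀ x ∈ a :: l, List.foldl min a l ≤ x := by
  induction l with
  | nil => simp
  | cons h t ih =>
    intro a x hx
    simp only [List.foldl_cons]
    rcases List.mem_cons.mp hx with he | hx'
    · rw [he]; exact le_trans (ih (min a h) _ (List.mem_cons_self ..)) (min_le_left _ _)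
    · rcases List.mem_cons.mp hx' with he | hm
      · rw [he]; exact le_trans (ih (min a h) _ (List.mem_cons_self ..)) (min_le_right _ _)
      · exact ih (min a h) _ (List.mem_cons.mpr (Or.inr hm))

lemma foldl_max_mem (l : List Int) : ∀ a : Int, List.foldl max a l ∈ a :: l := by
  induction l with
  | nil => simp
  | cons h t ih =>
    intro a
    simp only [List.foldl_cons]
    rcases List.mem_cons.mp (ih (max a h)) with hm | hm
    · rw [hm]; rcases max_cases a h with ⟨he, _⟩ | ⟨he, _⟩ <;> simp [he]
    · exact List.mem_cons_of_mem _ (List.mem_cons_of_mem _ hm)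

lemma foldl_max_ge_mem (l : List Int) : ∀ a : Int, ∀ x ∈ a :: l, x ≤ List.foldl max a l := by
  induction l with
  | nil => simp
  | cons h t ih =>
    intro a x hx
    simp only [List.foldl_cons]
    rcases List.mem_cons.mp hx with he | hx'
    · rw [he]; exact le_trans (le_max_left _ _) (ih (max a h) _ (List.mem_cons_self ..))
    · rcases List.mem_cons.mp hx' with he | hm
      · rw [he]; exact le_trans (le_max_right _ _) (ih (max a h) _ (List.mem_cons_self ..))
      · exact ih (max a h) _ (List.mem_cons.mpr (Or.inr hm))

-- a Pairwise-(≤) list is bounded above by its last element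
lemma pairwise_le_getLast {l : List Int} (hpw : l.Pairwise (· ≤ ·)) (hne : l ≠ []) :
    ∀ y ∈ l, y ≤ l.getLast hne := by
  induction l with
  | nil => simp
  | cons h t ih =>
    intro y hy
    cases t with
    | nil => simp at hy; simp [List.getLast, hy]
    | cons b u =>
      rcases List.mem_cons.mp hy with rfl | hy'
      · have hall : ∀ z ∈ b :: u, y ≤ z := fun z hz => (List.pairwise_cons.mp hpw).1 z hz
        have := hall _ (List.getLast_mem (l := b :: u) (by simp))
        simpa [List.getLast_cons] using this
      · have := ih (List.pairwise_cons.mp hpw).2 (by simp) y hy'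
        simpa [List.getLast_cons] using this

-- the sorted list of a nonempty list starts at its minimum …
lemma sorted_head_eq (a : Int) (l : List Int) :
    PySem.List.pyGet? (PySem.List.sorted (a :: l) (fun v => v) false) 0
      = some (List.foldl min a l) := by
  rcases hs : PySem.List.sorted (a :: l) (fun v => v) false with _ | ⟨m, t⟩
  · exact absurd ((PySem.List.sorted_eq_nil_iff _ _ _).mp hs) (by simp)
  have hmem : m ∈ a :: l :=
    (PySem.List.mem_sorted (a :: l) (fun v => v) false m).mp (hs ▸ List.mem_cons_self ..)
  have hle : ∀ y ∈ a :: l, m ≤ y := by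
    simpa using PySem.List.key_head_sorted_le (a :: l) (fun v => v) hs
  rw [PySem.List.pyGet?_zero_cons]
  exact congrArg some (le_antisymm (hle _ (foldl_min_mem l a)) (foldl_min_le_mem l a m hmem))

-- … and ends at its maximum
lemma sorted_last_eq (a : Int) (l : List Int) :
    PySem.List.pyGet? (PySem.List.sorted (a :: l) (fun v => v) false) (-1)
      = some (List.foldl max a l) := by
  have hsne : PySem.List.sorted (a :: l) (fun v => v) false ≠ [] := fun h => by
    simpa using (PySem.List.sorted_eq_nil_iff _ _ _).mp h
  have hpw : (PySem.List.sorted (a :: l) (fun v => v) false).Pairwise (· ≤ ·) := by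
    simpa using PySem.List.sorted_pairwise (a :: l) (fun v => v)
  have hmem : (PySem.List.sorted (a :: l) (fun v => v) false).getLast hsne ∈ a :: l :=
    (PySem.List.mem_sorted (a :: l) (fun v => v) false _).mp (List.getLast_mem hsne)
  have hge : ∀ y ∈ a :: l, y ≤ (PySem.List.sorted (a :: l) (fun v => v) false).getLast hsne :=
    fun y hy => pairwise_le_getLast hpw hsne y
      ((PySem.List.mem_sorted (a :: l) (fun v => v) false y).mpr hy)
  rw [PySem.List.pyGet?_neg_one, List.getLast?_eq_getLast_of_ne_nil hsne]
  exact congrArg some (le_antisymm (foldl_max_ge_mem l a _ hmem) (hge _ (foldl_max_mem l a)))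

lemma foldl_min_le (a : Int) (l : List Int) : List.foldl min a l ≤ a := by
  induction l generalizing a with
  | nil => simp
  | cons h t ih => exact le_trans (ih _) (min_le_left _ _)

lemma le_foldl_max (a : Int) (l : List Int) : a ≤ List.foldl max a l := by
  induction l generalizing a with
  | nil => simp
  | cons h t ih => exact le_trans (le_max_left _ _) (ih _)

-- the core invariant: A's loop computes the min/max of the flattened coordinates folded onto
-- the incoming state
lemma loop_char (data : List (List (Int × Int))) (a b c d : Int)
    (h : ∀ path ∈ data, path ≠ []) :
    data.foldl (fun (st : Int × Int × Int × Int) path =>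
      let (min_x, min_y, max_x, max_y) := st
      let x_list := path.map Prod.fst
      let y_list := path.map Prod.snd
      let min_x := if (PySem.List.min? x_list (fun v => v)).getD min_x < min_x then (PySem.List.min? x_list (fun v => v)).getD min_x else min_x
      let min_y := if (PySem.List.min? y_list (fun v => v)).getD min_y < min_y then (PySem.List.min? y_list (fun v => v)).getD min_y else min_y
      let max_x := if (PySem.List.max? x_list (fun v => v)).getD max_x > max_x then (PySem.List.max? x_list (fun v => v)).getD max_x else max_x
      let max_y := if (PySem.List.max? y_list (fun v => v)).getD max_y > max_y then (PySem.List.max? y_list (fun v => v)).getD max_y else max_y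
      (min_x, min_y, max_x, max_y)) (a, b, c, d)
    = ((data.flatMap (fun path => path.map Prod.fst)).foldl min a,
       (data.flatMap (fun path => path.map Prod.snd)).foldl min b,
       (data.flatMap (fun path => path.map Prod.fst)).foldl max c,
       (data.flatMap (fun path => path.map Prod.snd)).foldl max d) := by
  induction data generalizing a b c d with
  | nil => simp
  | cons p rest ih =>
    have hp : p ≠ [] := h p (List.mem_cons_self ..)
    obtain ⟨⟨x0, y0⟩, t, rfl⟩ : ∃ q t, p = q :: t := by
      cases p with
      | nil => exact absurd rfl hp
      | cons q t => exact ⟨q, t, rfl⟩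
    have hrest : ∀ path ∈ rest, path ≠ [] := fun q hq => h q (List.mem_cons_of_mem _ hq)
    simp only [List.foldl_cons, List.map_cons, PySem.List.min?_id_cons, PySem.List.max?_id_cons,
      Option.getD_some]
    rw [ih _ _ _ _ hrest]
    simp only [List.flatMap_cons, List.foldl_append, List.map_cons, List.foldl_cons]
    congr 1
    · split_ifs with h1 <;> rw [foldl_min_min] <;> congr 1
      · exact (min_eq_right h1.le).symm
      · exact (min_eq_left (not_lt.mp h1)).symm
    congr 1
    · split_ifs with h1 <;> rw [foldl_min_min] <;> congr 1
      · exact (min_eq_right h1.le).symm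
      · exact (min_eq_left (not_lt.mp h1)).symm
    congr 1
    · split_ifs with h1 <;> rw [foldl_max_max] <;> congr 1
      · exact (max_eq_right h1.le).symm
      · exact (max_eq_left (not_lt.mp h1)).symm
    · split_ifs with h1 <;> rw [foldl_max_max] <;> congr 1
      · exact (max_eq_right h1.le).symm
      · exact (max_eq_left (not_lt.mp h1)).symm

-- ===== VERDICT (by name: the statement is the Claim_ definition above) =====
theorem determine_boundaries_spec : Claim_equal_determine_boundaries := by
  intro data part_id _ hpre
  unfold Spec_determine_boundaries determine_boundaries determine_boundaries_alt
  simp only [loop_char data 500 0 500 0 hpre, sorted_head_eq, sorted_last_eq, Option.getD_some]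
  have h1 : min 500 ((data.flatMap (fun path => path.map Prod.fst)).foldl min 500)
      = (data.flatMap (fun path => path.map Prod.fst)).foldl min 500 :=
    min_eq_right (foldl_min_le _ _)
  have h2 : max 500 ((data.flatMap (fun path => path.map Prod.fst)).foldl max 500)
      = (data.flatMap (fun path => path.map Prod.fst)).foldl max 500 :=
    max_eq_right (le_foldl_max _ _)
  rw [h1, h2]

@[simp] theorem determine_boundaries_raises : Claim_raises_determine_boundaries := by
  unfold Claim_raises_determine_boundaries
  exact ⟨fun data part_id _ hr hpre => hpre [] hr rfl, by decide⟩
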